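-- pv_equiv track=rewrite | github.com/RagnarGrootKoerkamp/minimizers | py/playground.py | step_runs
-- ===== SOURCE A (Python) =====
-- def step_runs(vals, p=False):
--     m = max(vals)
--     # [ones+zeros, zeros, pos]
--     runs = [[0, 0, -1]]
--     for i, x in enumerate(vals):
--         if x == m and runs[-1][1] == 0:
--             # one, extend
--             runs[-1][0] += 1
--             runs[-1][2] = i
--         elif x == m:
--             # drop leading zeros
--             if runs[-1][0] == runs[-1][1]:
--                 runs.pop()
--
--             # one, new
--             runs.append([1, 0, i])
--         else:
--             # zero, extend
--             runs[-1][0] += 1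
--             runs[-1][1] += 1
--             if runs[-1][0] == runs[-1][1]:
--                 runs[-1][2] = i
--     if len(runs) > 1 and runs[-1][1] == 0:
--         runs.pop()
--
--     for i in range(len(runs)):
--         runs[i][1] = runs[i][0] - runs[i][1]
--         runs[i][0] -= runs[i][1]
--
--     return runs
-- ===== SOURCE B (Python) =====
-- def step_runs(vals, p=False):
--     m = max(vals)
--     n = len(vals)
--     # positions of maximal elements, grouped into maximal consecutive blocks [start, end]
--     blocks = []
--     for i, x in enumerate(vals):
--         if x == m:
--             if blocks and blocks[-1][1] == i - 1:
--                 blocks[-1][1] = i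
--             else:
--                 blocks.append([i, i])
--     runs = []
--     for k, (s, e) in enumerate(blocks):
--         nxt = blocks[k + 1][0] if k + 1 < len(blocks) else n
--         runs.append([nxt - e - 1, e - s + 1, e])
--     if len(runs) > 1 and runs[-1][0] == 0:
--         runs.pop()
--     return runs
-- ===== Notes on version B (the rewrite author's own statement) =====
-- stated objective: simpler
-- what changed: Replaces A's stateful run-merging loop (a mutable list of [total, zeros, pos] rows with pop/extend/append cases and a final in-place re-encoding pass) by a decomposition: group the positions of maximal elements into consecutive blocks, then emit one [zeros, ones, pos] row per block directly from block boundaries, popping a trailing zero-gap row.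
-- outside the precondition, e.g. on step_runs([], False): A raises ValueError, B raises ValueError
import Mathlib
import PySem

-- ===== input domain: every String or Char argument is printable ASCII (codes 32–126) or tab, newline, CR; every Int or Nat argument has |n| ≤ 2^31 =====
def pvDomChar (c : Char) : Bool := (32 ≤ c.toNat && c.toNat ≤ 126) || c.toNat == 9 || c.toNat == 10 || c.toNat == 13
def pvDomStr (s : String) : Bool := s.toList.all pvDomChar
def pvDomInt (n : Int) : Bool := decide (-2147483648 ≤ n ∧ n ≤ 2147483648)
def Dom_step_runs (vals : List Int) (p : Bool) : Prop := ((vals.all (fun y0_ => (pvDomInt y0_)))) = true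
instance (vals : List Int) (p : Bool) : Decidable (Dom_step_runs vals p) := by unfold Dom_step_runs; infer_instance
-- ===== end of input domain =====

-- B replaces A's single stateful run-merging loop by a decomposition: collect the maximal-element
-- positions into consecutive blocks, then emit one [zeros, ones, pos] row per block (objective: simpler).

-- ===== PORT A =====
-- A's runs list is kept in REVERSED order (head = Python runs[-1]); a row [total, zeros, pos] is the triple (t, z, pos)
def pvA_step (m : Int) (st : List (Int × Int × Int)) (ix : Int × Int) : List (Int × Int × Int) :=
  match st with
  | [] => []   -- unreachable: the runs list is never empty
  | (t, z, pos) :: rest =>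
    if ix.2 = m ∧ z = 0 then
      -- one, extend
      (t + 1, z, ix.1) :: rest
    else if ix.2 = m then
      -- drop leading zeros, then one, new
      (1, 0, ix.1) :: (if t = z then rest else (t, z, pos) :: rest)
    else
      -- zero, extend
      (t + 1, z + 1, if t + 1 = z + 1 then ix.1 else pos) :: rest

def pvAfold (vals : List Int) (m : Int) : List (Int × Int × Int) :=
  (PySem.List.enumerate vals).foldl (pvA_step m) [(0, 0, -1)]

-- if len(runs) > 1 and runs[-1][1] == 0: runs.pop()   (runs reversed: head = runs[-1])
def pvA_pop (runs : List (Int × Int × Int)) : List (Int × Int × Int) :=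
  match runs with
  | (t, z, pos) :: r :: rest => if z = 0 then r :: rest else (t, z, pos) :: r :: rest
  | other => other

def step_runs (vals : List Int) (p : Bool) : List (List Int) :=
  match PySem.List.max? vals (fun x => x) with
  | none => []   -- max([]) raises ValueError; excluded by Pre_step_runs
  | some m =>
    let runs := pvA_pop (pvAfold vals m)
    -- final in-place transform: [t, z, pos] -> [z, t - z, pos]
    (runs.reverse).map (fun r => [r.2.1, r.1 - r.2.1, r.2.2])

-- ===== PORT B =====
-- B's blocks list is kept in REVERSED order while building (head = Python blocks[-1])
def pvB_addBlock (bs : List (Int × Int)) (i : Int) : List (Int × Int) :=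
  match bs with
  | (s, e) :: rest => if e = i - 1 then (s, i) :: rest else (i, i) :: (s, e) :: rest
  | [] => [(i, i)]

def pvBfold (vals : List Int) (m : Int) : List (Int × Int) :=
  (PySem.List.enumerate vals).foldl (fun bs ix => if ix.2 = m then pvB_addBlock bs ix.1 else bs) []

def pvB_rows (n : Int) : List (Int × Int) → List (List Int)
  | [] => []
  | (s, e) :: rest =>
    let nxt := match rest with | (s2, _) :: _ => s2 | [] => n
    [nxt - e - 1, e - s + 1, e] :: pvB_rows n rest

-- if len(runs) > 1 and runs[-1][0] == 0: runs.pop()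
def pvB_pop (runs : List (List Int)) : List (List Int) :=
  match runs.getLast? with
  | some (z :: _) => if runs.length > 1 ∧ z = 0 then runs.dropLast else runs
  | _ => runs

def step_runs_alt (vals : List Int) (p : Bool) : List (List Int) :=
  match PySem.List.max? vals (fun x => x) with
  | none => []   -- max([]) raises ValueError; excluded by Pre_step_runs
  | some m =>
    let n : Int := vals.length
    let blocks := (pvBfold vals m).reverse
    pvB_pop (pvB_rows n blocks)

-- ===== PRECONDITION & SPEC =====
-- Pre_ excludes only the empty list, on which max(vals) raises ValueError in both A and B.
def Pre_step_runs (vals : List Int) (p : Bool) : Prop := vals ≠ []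
instance (vals : List Int) (p : Bool) : Decidable (Pre_step_runs vals p) := by unfold Pre_step_runs; infer_instance

def pvWitness_step_runs : List Int × Bool := ([2, 1, 2, 2, 0, 2], false)

def Spec_step_runs (vals : List Int) (p : Bool) (out : List (List Int)) : Prop := out = step_runs_alt vals p
instance (vals : List Int) (p : Bool) (out : List (List Int)) : Decidable (Spec_step_runs vals p out) := by unfold Spec_step_runs; infer_instance

-- ===== CLAIM (what is proved, stated in full; the proofs are below) =====
def Claim_equal_step_runs : Prop := ∀ (vals : List Int) (p : Bool), Dom_step_runs vals p → Pre_step_runs vals p → Spec_step_runs vals p (step_runs vals p)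

-- ===== LEMMAS AND PROOFS =====

-- read A's run rows off a reversed block list: head block's trailing zeros run to `nxt`
def pvInterp (nxt : Int) : List (Int × Int) → List (Int × Int × Int)
  | [] => []
  | (s, e) :: rest => (nxt - s, nxt - e - 1, e) :: pvInterp s rest

def pvRow (r : Int × Int × Int) : List Int := [r.2.1, r.1 - r.2.1, r.2.2]

lemma pvBfold_append (l : List Int) (a m : Int) :
    pvBfold (l ++ [a]) m =
      if a = m then pvB_addBlock (pvBfold l m) (l.length : Int) else pvBfold l m := by
  simp [pvBfold, PySem.List.enumerate_append, List.foldl_append, PySem.List.enumerate]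

lemma pvAfold_append (l : List Int) (a m : Int) :
    pvAfold (l ++ [a]) m = pvA_step m (pvAfold l m) ((l.length : Int), a) := by
  simp [pvAfold, PySem.List.enumerate_append, List.foldl_append, PySem.List.enumerate]

lemma pvA_step_cons (m t z pos i x : Int) (rest : List (Int × Int × Int)) :
    pvA_step m ((t, z, pos) :: rest) (i, x) =
      if x = m ∧ z = 0 then (t + 1, z, i) :: rest
      else if x = m then (1, 0, i) :: (if t = z then rest else (t, z, pos) :: rest)
      else (t + 1, z + 1, if t + 1 = z + 1 then i else pos) :: rest := rfl

lemma pvB_addBlock_nil (i : Int) : pvB_addBlock [] i = [(i, i)] := rfl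

lemma pvB_addBlock_cons (s e i : Int) (rest : List (Int × Int)) :
    pvB_addBlock ((s, e) :: rest) i =
      if e = i - 1 then (s, i) :: rest else (i, i) :: (s, e) :: rest := rfl

-- the main invariant relating A's fold state to B's reversed block list
lemma pv_inv (m : Int) (vals : List Int) :
    (pvAfold vals m =
      (if pvBfold vals m = [] then [((vals.length : Int), (vals.length : Int), (vals.length : Int) - 1)]
       else pvInterp (vals.length : Int) (pvBfold vals m)))
    ∧ (∀ se ∈ pvBfold vals m, se.1 ≤ se.2) := by
  induction vals using List.reverseRecOn with
  | nil => simp [pvAfold, pvBfold, PySem.List.enumerate]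
  | append_singleton l a ih =>
    obtain ⟨ihA, ihB⟩ := ih
    rw [pvAfold_append, pvBfold_append, ihA]
    have hlen1 : ((l ++ [a]).length : Int) = (l.length : Int) + 1 := by simp
    by_cases ham : a = m
    · simp only [if_pos ham]
      cases hbs : pvBfold l m with
      | nil =>
        rw [if_pos rfl, pvA_step_cons, pvB_addBlock_nil,
          if_neg (List.cons_ne_nil _ _), hlen1]
        refine ⟨?_, ?_⟩
        · by_cases hn : (l.length : Int) = 0
          · rw [if_pos ⟨ham, hn⟩]
            simp [pvInterp, hn]
          · rw [if_neg (fun h => hn h.2), if_pos ham, if_pos rfl]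
            simp only [pvInterp, List.cons.injEq, Prod.mk.injEq, and_true,
              eq_self_iff_true, true_and, and_self]
            first | trivial | omega
        · intro se hse
          simp at hse
          simp [hse]
      | cons hd rest =>
        obtain ⟨s, e⟩ := hd
        rw [hbs] at ihB
        have hse : s ≤ e := ihB (s, e) (by simp)
        rw [if_neg (List.cons_ne_nil _ _), pvB_addBlock_cons, hlen1]
        simp only [pvInterp]
        rw [pvA_step_cons]
        by_cases hlast : e = (l.length : Int) - 1
        · have hz : (l.length : Int) - e - 1 = 0 := by omega
          refine ⟨?_, ?_⟩
          · rw [if_pos ⟨ham, hz⟩, if_pos hlast, if_neg (List.cons_ne_nil _ _)]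
            simp only [pvInterp, List.cons.injEq, Prod.mk.injEq, and_true,
              eq_self_iff_true, true_and, and_self]
            first | trivial | omega
          · intro se hse'
            rw [if_pos hlast] at hse'
            rcases List.mem_cons.mp hse' with h | h
            · simp [h]; omega
            · exact ihB se (List.mem_cons_of_mem _ h)
        · have hz : ¬((l.length : Int) - e - 1 = 0) := fun h => hlast (by omega)
          have hne : ¬((l.length : Int) - s = (l.length : Int) - e - 1) := by omega
          refine ⟨?_, ?_⟩
          · rw [if_neg (fun h => hz h.2), if_pos ham, if_neg hne, if_neg hlast,
              if_neg (List.cons_ne_nil _ _)]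
            simp only [pvInterp, List.cons.injEq, Prod.mk.injEq, and_true,
              eq_self_iff_true, true_and, and_self]
            first | trivial | omega
          · intro se hse'
            rw [if_neg hlast] at hse'
            rcases List.mem_cons.mp hse' with h | h
            · simp [h]
            · exact ihB se h
    · simp only [if_neg ham]
      cases hbs : pvBfold l m with
      | nil =>
        refine ⟨?_, by simp⟩
        rw [if_pos rfl, if_pos rfl, pvA_step_cons, hlen1]
        rw [if_neg (fun h => ham h.1), if_neg ham, if_pos rfl]
        simp only [List.cons.injEq, Prod.mk.injEq, and_true, eq_self_iff_true,
          true_and, and_self]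
        first | trivial | omega
      | cons hd rest =>
        obtain ⟨s, e⟩ := hd
        rw [hbs] at ihB
        have hse : s ≤ e := ihB (s, e) (by simp)
        refine ⟨?_, ihB⟩
        have hne : ¬((l.length : Int) - s + 1 = (l.length : Int) - e - 1 + 1) := by omega
        rw [if_neg (List.cons_ne_nil _ _), if_neg (List.cons_ne_nil _ _), hlen1]
        simp only [pvInterp]
        rw [pvA_step_cons, if_neg (fun h => ham h.1), if_neg ham, if_neg hne]
        simp only [List.cons.injEq, Prod.mk.injEq, and_true, eq_self_iff_true,
          true_and, and_self]
        first | trivial | omega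

lemma pvB_rows_append (n s e : Int) (bs : List (Int × Int)) :
    pvB_rows n (bs ++ [(s, e)]) = pvB_rows s bs ++ [[n - e - 1, e - s + 1, e]] := by
  induction bs with
  | nil => simp [pvB_rows]
  | cons hd rest ih =>
    obtain ⟨s2, e2⟩ := hd
    cases rest with
    | nil => simp [pvB_rows]
    | cons hd2 rest2 => simpa [pvB_rows] using ih

lemma pvB_rows_reverse (n : Int) (rbs : List (Int × Int)) :
    pvB_rows n rbs.reverse = ((pvInterp n rbs).map pvRow).reverse := by
  induction rbs generalizing n with
  | nil => simp [pvB_rows, pvInterp]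
  | cons hd rest ih =>
    obtain ⟨s, e⟩ := hd
    rw [List.reverse_cons, pvB_rows_append, ih]
    simp only [pvInterp, List.map_cons, List.reverse_cons]
    congr 2
    simp [pvRow]; omega

lemma pvBfold_ne_nil_aux (m : Int) (ixs : List (Int × Int)) (bs : List (Int × Int)) (h : bs ≠ []) :
    ixs.foldl (fun bs ix => if ix.2 = m then pvB_addBlock bs ix.1 else bs) bs ≠ [] := by
  induction ixs generalizing bs with
  | nil => exact h
  | cons hd t ih =>
    simp only [List.foldl_cons]
    apply ih
    split
    · unfold pvB_addBlock
      cases bs with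
      | nil => simp
      | cons b r => obtain ⟨s, e⟩ := b; dsimp; split <;> simp
    · exact h

lemma pvBfold_ne_nil (vals : List Int) (m : Int) (hm : m ∈ vals) : pvBfold vals m ≠ [] := by
  obtain ⟨k, hk, hv⟩ := List.mem_iff_getElem.mp hm
  unfold pvBfold
  have hmem : ((k : Int), m) ∈ PySem.List.enumerate vals := by
    rw [PySem.List.mem_enumerate_iff]
    exact ⟨k, hk, by simp [hv]⟩
  obtain ⟨l1, l2, hsplit⟩ := List.append_of_mem hmem
  rw [hsplit, List.foldl_append, List.foldl_cons]
  apply pvBfold_ne_nil_aux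
  dsimp only
  rw [if_pos rfl]
  cases l1.foldl (fun bs ix => if ix.2 = m then pvB_addBlock bs ix.1 else bs) [] with
  | nil => rw [pvB_addBlock_nil]; exact List.cons_ne_nil _ _
  | cons b r =>
    obtain ⟨s, e⟩ := b
    rw [pvB_addBlock_cons]
    split <;> exact List.cons_ne_nil _ _

lemma pvB_pop_concat2 (l : List (List Int)) (r : List Int) (z : Int) (rs : List Int) :
    pvB_pop (l ++ [r, z :: rs]) = if z = 0 then l ++ [r] else l ++ [r, z :: rs] := by
  have h : l ++ [r, z :: rs] = (l ++ [r]) ++ [z :: rs] := by simp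
  unfold pvB_pop
  rw [h, List.getLast?_concat]
  dsimp only
  by_cases hz0 : z = 0
  · rw [if_pos ⟨by simp, hz0⟩, if_pos hz0, List.dropLast_concat]
  · rw [if_neg (fun hc => hz0 hc.2), if_neg hz0]

-- ===== VERDICT (by name: the statement is the Claim_ definition above) =====
theorem step_runs_spec : Claim_equal_step_runs := by
  intro vals p _ hpre
  unfold Spec_step_runs step_runs step_runs_alt
  cases hmax : PySem.List.max? vals (fun x => x) with
  | none => exact absurd hmax (by simp [PySem.List.max?_eq_none_iff]; exact hpre)
  | some m =>
    have hm : m ∈ vals := PySem.List.max?_mem hmax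
    have hne := pvBfold_ne_nil vals m hm
    obtain ⟨hA, _⟩ := pv_inv m vals
    rw [if_neg hne] at hA
    cases hbs : pvBfold vals m with
    | nil => exact absurd hbs hne
    | cons hd rest =>
      obtain ⟨s, e⟩ := hd
      rw [hbs] at hA
      simp only [hA, pvB_rows_reverse, hbs, pvInterp]
      set tst := pvInterp s rest with htst
      cases tst with
      | nil =>
        -- one single run: neither side pops
        simp [pvA_pop, pvB_pop, pvRow]
      | cons h2 t2 =>
        simp only [List.map_cons, List.reverse_cons, List.append_assoc,
          List.cons_append, List.nil_append, pvRow]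
        by_cases hz : (vals.length : Int) - e - 1 = 0
        · rw [hz, pvB_pop_concat2, if_pos rfl]
          simp [pvA_pop, pvRow]
        · rw [pvB_pop_concat2, if_neg hz]
          simp [pvA_pop, pvRow, hz]
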